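-- pv_equiv track=rewrite | github.com/blzzua/codewars | 6-kyu/simple_fun_66_obtain_max_number.py | obtain_max_number
-- ===== SOURCE A (Python) =====
-- from collections import Counter
--
-- def obtain_max_number(lst):
--     while True:
--         doubles = [k for k,v in Counter(lst).items() if v >= 2]
--         if doubles:
--             for k in doubles:
--                 a = lst.pop(lst.index(k))
--                 b = lst.pop(lst.index(k))
--                 lst.append(a+b)
--         else:
--             break
--     return max(lst)
-- ===== SOURCE B (Python) =====
-- def obtain_max_number(lst):
--     # Group elements by odd part; each group's final merged maximum is
--     # determined by the group's sum alone. O(n log C) instead of repeated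
--     # whole-list scans. (A mutates its argument in place; B does not.)
--     sums = {}
--     has_zero = False
--     for x in lst:
--         if x == 0:
--             has_zero = True
--             continue
--         o = x
--         while o % 2 == 0:
--             o //= 2
--         sums[o] = sums.get(o, 0) + x
--     best = None
--     for o, s in sums.items():
--         m = s // o
--         if o > 0:
--             t, p = m, 1
--             while t > 1:
--                 t //= 2
--                 p *= 2
--             v = o * p
--         else:
--             p = 1
--             while m % 2 == 0:
--                 m //= 2
--                 p *= 2
--             v = o * p
--         if best is None or v > best:
--             best = v
--     if has_zero and (best is None or best < 0):
--         best = 0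
--     return best
-- ===== Notes on version B (the rewrite author's own statement) =====
-- stated objective: faster
-- what changed: A repeatedly rebuilds a Counter and rescans/mutates the list until no value occurs twice; B makes one pass grouping elements by their odd part and computes each group's merged maximum directly from the group sum (highest set bit for positive odd parts, lowest for negative), then takes the overall max.
import Mathlib
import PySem

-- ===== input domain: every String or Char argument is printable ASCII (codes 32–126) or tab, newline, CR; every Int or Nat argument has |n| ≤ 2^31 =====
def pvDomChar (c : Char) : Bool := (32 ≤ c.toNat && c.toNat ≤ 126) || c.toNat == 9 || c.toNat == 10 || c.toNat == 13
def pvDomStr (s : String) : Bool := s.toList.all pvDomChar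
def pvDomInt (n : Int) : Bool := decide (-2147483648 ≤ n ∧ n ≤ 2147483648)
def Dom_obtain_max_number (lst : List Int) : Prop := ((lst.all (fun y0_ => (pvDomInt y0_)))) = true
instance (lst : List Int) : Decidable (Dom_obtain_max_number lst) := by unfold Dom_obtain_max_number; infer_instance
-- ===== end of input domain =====

-- B replaces A's repeated merge-and-rescan loop by a single pass that groups elements by odd part
-- and computes each group's merged maximum from its sum in closed form (equivalence is about the
-- return value only: Python A mutates its argument in place, B does not).


-- ===== PORT A =====
-- a = lst.pop(lst.index(k)); b = lst.pop(lst.index(k)); lst.append(a+b).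
-- The 'none' fallbacks are the branches where Python would raise ValueError/IndexError;
-- they are unreachable in the loop below (every popped key has count ≥ 2).
def popTwoAppend (lst : List Int) (k : Int) : List Int :=
  match PySem.List.index? lst k with
  | none => lst
  | some i =>
    match PySem.List.pop? lst (i : Int) with
    | none => lst
    | some (a, l1) =>
      match PySem.List.index? l1 k with
      | none => l1
      | some j =>
        match PySem.List.pop? l1 (j : Int) with
        | none => l1
        | some (b, l2) => l2 ++ [a + b]

-- doubles = [k for k,v in Counter(lst).items() if v >= 2]
def pyDoubles (lst : List Int) : List Int :=
  (((PySem.Dict.counter lst).items.filter (fun p => decide ((2:Int) ≤ p.2))).map (·.1))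

-- termination support for obtainLoop (cited by its decreasing_by)
theorem pop_at_index_pre (lst : List Int) (k : Int) (hk : k ∈ lst) :
    ∃ i, PySem.List.index? lst k = some i ∧
      PySem.List.pop? lst (i : Int) = some (k, lst.erase k) := by
  have hs := (PySem.List.index?_isSome_iff lst k).mpr hk
  obtain ⟨i, hi⟩ := Option.isSome_iff_exists.mp hs
  obtain ⟨hlt, hget, _⟩ := PySem.List.getElem_of_index?_eq_some hi
  refine ⟨i, hi, ?_⟩
  rw [PySem.List.pop?_natCast lst i hlt, hget]
  have hidx : List.idxOf k lst = i := by
    rw [List.idxOf_eq_getD_idxOf?]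
    rw [PySem.List.index?_eq_idxOf?] at hi
    simp [hi]
  rw [← hidx, List.eraseIdx_idxOf_eq_erase]

theorem length_popTwoAppend_le (lst : List Int) (k : Int) :
    (popTwoAppend lst k).length ≤ lst.length := by
  unfold popTwoAppend
  rcases h1 : PySem.List.index? lst k with _ | i
  · simp only [h1]; exact le_refl _
  rcases h2 : PySem.List.pop? lst (i : Int) with _ | ⟨a, l1⟩
  · simp only [h1, h2]; exact le_refl _
  have e1 := PySem.List.length_of_pop?_eq_some lst h2
  simp only at e1
  rcases h3 : PySem.List.index? l1 k with _ | j
  · simp only [h1, h2, h3]; omega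
  rcases h4 : PySem.List.pop? l1 (j : Int) with _ | ⟨b, l2⟩
  · simp only [h1, h2, h3, h4]; omega
  have e2 := PySem.List.length_of_pop?_eq_some l1 h4
  simp only at e2
  simp only [h1, h2, h3, h4, List.length_append, List.length_cons, List.length_nil]
  omega

theorem length_popTwoAppend_lt (lst : List Int) (k : Int) (h : k ∈ lst) :
    (popTwoAppend lst k).length < lst.length := by
  obtain ⟨i, hi, hp⟩ := pop_at_index_pre lst k h
  have e1 : (lst.erase k).length + 1 = lst.length := PySem.List.length_of_pop?_eq_some lst hp
  unfold popTwoAppend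
  rcases h3 : PySem.List.index? (lst.erase k) k with _ | j
  · simp only [hi, hp, h3]; omega
  rcases h4 : PySem.List.pop? (lst.erase k) (j : Int) with _ | ⟨b, l2⟩
  · simp only [hi, hp, h3, h4]; omega
  have e2 := PySem.List.length_of_pop?_eq_some (lst.erase k) h4
  simp only at e2
  simp only [hi, hp, h3, h4, List.length_append, List.length_cons, List.length_nil]
  omega

theorem length_foldl_popTwoAppend_le (ds : List Int) (c : List Int) :
    (ds.foldl popTwoAppend c).length ≤ c.length := by
  induction ds generalizing c with
  | nil => exact le_refl _
  | cons k ds ih =>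
    exact le_trans (ih (popTwoAppend c k)) (length_popTwoAppend_le c k)

theorem pyDoubles_eq (lst : List Int) :
    pyDoubles lst = (PySem.Set.ofList lst).filter (fun x => decide ((2:Int) ≤ (lst.count x : Int))) := by
  simp only [pyDoubles, PySem.Dict.items_counter, List.filter_map, List.map_map]
  have h1 : ((fun (x : Int × Int) => x.1) ∘ fun (k : Int) => (k, (List.count k lst : Int))) = id := rfl
  rw [h1, List.map_id]
  rfl

theorem mem_of_mem_pyDoubles (lst : List Int) (k : Int) (h : k ∈ pyDoubles lst) : k ∈ lst := by
  rw [pyDoubles_eq] at h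
  exact (PySem.Set.mem_ofList lst k).mp (List.mem_of_mem_filter h)

theorem length_foldl_popTwoAppend_lt (k : Int) (ds : List Int) (c : List Int) (h : k ∈ c) :
    ((k :: ds).foldl popTwoAppend c).length < c.length := by
  simp only [List.foldl_cons]
  exact lt_of_le_of_lt (length_foldl_popTwoAppend_le ds (popTwoAppend c k))
    (length_popTwoAppend_lt c k h)

-- while True: doubles = …; if doubles: for k in doubles: …  else: break
def obtainLoop (lst : List Int) : List Int :=
  match hd : pyDoubles lst with
  | [] => lst
  | k :: ds => obtainLoop ((k :: ds).foldl popTwoAppend lst)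
termination_by lst.length
decreasing_by
  exact length_foldl_popTwoAppend_lt k ds lst (mem_of_mem_pyDoubles lst k (hd ▸ List.mem_cons_self))

def obtain_max_number (lst : List Int) : Int :=
  match PySem.List.max? (obtainLoop lst) (fun x => x) with
  | some m => m
  | none => 0   -- max([]) raises ValueError in Python: excluded by Pre_

-- ===== PORT B =====
-- o = x; while o % 2 == 0: o //= 2   (the o ≠ 0 conjunct only makes the loop total; Source B never calls it with 0)
def oddLoop (o : Int) : Int :=
  if h : o ≠ 0 ∧ PySem.Int.mod o 2 = 0 then oddLoop (PySem.Int.floordiv o 2) else o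
termination_by o.natAbs
decreasing_by
  rw [PySem.Int.mod_eq_emod_of_pos (by omega : (0:Int) < 2)] at h
  rw [PySem.Int.floordiv_eq_ediv_of_pos (by omega : (0:Int) < 2)]
  omega

-- t, p = m, 1; while t > 1: t //= 2; p *= 2
def msbLoop (t p : Int) : Int × Int :=
  if h : 1 < t then msbLoop (PySem.Int.floordiv t 2) (p * 2) else (t, p)
termination_by t.toNat
decreasing_by
  rw [PySem.Int.floordiv_eq_ediv_of_pos (by omega : (0:Int) < 2)]
  omega

-- p = 1; while m % 2 == 0: m //= 2; p *= 2   (m ≠ 0 conjunct only for totality; unreachable with m = 0)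
def lsbLoop (m p : Int) : Int × Int :=
  if h : m ≠ 0 ∧ PySem.Int.mod m 2 = 0 then lsbLoop (PySem.Int.floordiv m 2) (p * 2) else (m, p)
termination_by m.natAbs
decreasing_by
  rw [PySem.Int.mod_eq_emod_of_pos (by omega : (0:Int) < 2)] at h
  rw [PySem.Int.floordiv_eq_ediv_of_pos (by omega : (0:Int) < 2)]
  omega

-- first loop of Source B: build (sums, has_zero)
def buildStep (acc : PySem.Dict Int Int × Bool) (x : Int) : PySem.Dict Int Int × Bool :=
  if x = 0 then (acc.1, true)
  else
    (acc.1.insert (oddLoop x) (acc.1.getD (oddLoop x) 0 + x), acc.2)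

-- body of the second loop: v for one (o, s) item
def itemVal (p : Int × Int) : Int :=
  let m := PySem.Int.floordiv p.2 p.1
  if 0 < p.1 then p.1 * (msbLoop m 1).2 else p.1 * (lsbLoop m 1).2

-- if best is None or v > best: best = v
def bestStep (best : Option Int) (p : Int × Int) : Option Int :=
  match best with
  | none => some (itemVal p)
  | some b => if b < itemVal p then some (itemVal p) else some b

def obtain_max_number_alt (lst : List Int) : Int :=
  match lst.foldl buildStep (PySem.Dict.empty, false) with
  | (sums, has_zero) =>
    match sums.items.foldl bestStep none with
    | none => 0   -- best is None: 0 if has_zero; otherwise Source B returns None (only lst = [], excluded by Pre_)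
    | some b => if has_zero ∧ b < 0 then 0 else b

-- ===== PRECONDITION & SPEC =====
-- Pre_ excludes only the empty list, on which Python A raises ValueError (max of empty sequence).
def Pre_obtain_max_number (lst : List Int) : Prop := lst ≠ []
instance (lst : List Int) : Decidable (Pre_obtain_max_number lst) := by
  unfold Pre_obtain_max_number; infer_instance

def pvWitness_obtain_max_number : List Int := ([1, 2, 2, 3])

def Spec_obtain_max_number (lst : List Int) (out : Int) : Prop := out = obtain_max_number_alt lst
instance (lst : List Int) (out : Int) : Decidable (Spec_obtain_max_number lst out) := by
  unfold Spec_obtain_max_number; infer_instance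

-- ===== CLAIM (what is proved, stated in full; the proofs are below) =====
def Claim_equal_obtain_max_number : Prop := ∀ (lst : List Int), Dom_obtain_max_number lst →
  Pre_obtain_max_number lst → Spec_obtain_max_number lst (obtain_max_number lst)

-- ===== LEMMAS AND PROOFS =====

-- helper definitions used only by the proofs
def gpred (o : Int) (x : Int) : Bool := decide (x ≠ 0) && decide (oddLoop x = o)

def gsum (l : List Int) (o : Int) : Int := (l.filter (gpred o)).sum

def keyIn (l : List Int) (o : Int) : Bool := l.any (gpred o)

def buildD (l : List Int) (d : PySem.Dict Int Int) : PySem.Dict Int Int :=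
  l.foldl (fun d x => if x = 0 then d else d.insert (oddLoop x) (d.getD (oddLoop x) 0 + x)) d

-- number of trailing binary zeros, mirroring oddLoop's recursion
def tzAux (x : Int) : Nat :=
  if h : x ≠ 0 ∧ PySem.Int.mod x 2 = 0 then tzAux (PySem.Int.floordiv x 2) + 1 else 0
termination_by x.natAbs
decreasing_by
  rw [PySem.Int.mod_eq_emod_of_pos (by omega : (0:Int) < 2)] at h
  rw [PySem.Int.floordiv_eq_ediv_of_pos (by omega : (0:Int) < 2)]
  omega

-- ---- basic facts about A's primitives ----

theorem popTwoAppend_eq (lst : List Int) (k : Int) (h : 2 ≤ lst.count k) :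
    popTwoAppend lst k = ((lst.erase k).erase k) ++ [k + k] := by
  have hk1 : k ∈ lst := List.count_pos_iff.mp (by omega)
  obtain ⟨i, hi, hp⟩ := pop_at_index_pre lst k hk1
  have hk2 : k ∈ lst.erase k := by
    have := @List.count_erase_self _ _ _ k lst
    exact List.count_pos_iff.mp (by omega)
  obtain ⟨j, hj, hq⟩ := pop_at_index_pre (lst.erase k) k hk2
  simp only [popTwoAppend, hi, hp, hj, hq]

-- ---- B's small loops ----

theorem floordiv_mul_cancel (o s : Int) (ho : o ≠ 0) : PySem.Int.floordiv (o * s) o = s := by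
  have hmod : PySem.Int.mod (o * s) o = 0 := (PySem.Int.mod_eq_zero_iff_dvd _ _).mpr ⟨s, rfl⟩
  have hdm := PySem.Int.floordiv_mul_add_mod (o * s) o
  rw [hmod, add_zero] at hdm
  have : PySem.Int.floordiv (o * s) o * o = s * o := by rw [hdm]; ring
  exact mul_right_cancel₀ ho this

theorem oddLoop_spec (x : Int) (hx : x ≠ 0) :
    x = oddLoop x * 2 ^ (tzAux x) ∧ PySem.Int.mod (oddLoop x) 2 = 1 ∧ oddLoop x ≠ 0 := by
  induction x using oddLoop.induct with
  | case1 x h ih =>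
    obtain ⟨hx0, hm⟩ := h
    obtain ⟨q, hq⟩ := (PySem.Int.mod_eq_zero_iff_dvd x 2).mp hm
    have hfd : PySem.Int.floordiv x 2 = q := by rw [hq]; exact floordiv_mul_cancel 2 q (by omega)
    have hq0 : q ≠ 0 := by intro h0; rw [h0, mul_zero] at hq; exact hx0 hq
    rw [oddLoop, tzAux, dif_pos ⟨hx0, hm⟩, dif_pos ⟨hx0, hm⟩, hfd]
    rw [hfd] at ih
    obtain ⟨e1, e2, e3⟩ := ih hq0
    refine ⟨?_, e2, e3⟩
    rw [hq]
    rw [pow_succ]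
    nth_rewrite 1 [e1]
    ring
  | case2 x h =>
    rw [oddLoop, tzAux, dif_neg h, dif_neg h]
    have hm : PySem.Int.mod x 2 = 1 := by
      rcases PySem.Int.mod_two_eq x with h0 | h1
      · exact absurd ⟨hx, h0⟩ h
      · exact h1
    exact ⟨by ring, hm, hx⟩

theorem oddLoop_double (k : Int) (hk : k ≠ 0) : oddLoop (k + k) = oddLoop k := by
  have h2 : k + k = 2 * k := by ring
  have hm : PySem.Int.mod (k + k) 2 = 0 := (PySem.Int.mod_eq_zero_iff_dvd _ 2).mpr ⟨k, h2⟩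
  have hfd : PySem.Int.floordiv (k + k) 2 = k := by rw [h2]; exact floordiv_mul_cancel 2 k (by omega)
  rw [oddLoop, dif_pos ⟨by omega, hm⟩, hfd]

theorem msbLoop_spec (e : Nat) (t p : Int) (h1 : 2 ^ e ≤ t) (h2 : t < 2 ^ (e + 1)) :
    (msbLoop t p).2 = p * 2 ^ e := by
  induction e generalizing t p with
  | zero =>
    have ht : t = 1 := by norm_num at h1 h2; omega
    rw [msbLoop, dif_neg (by omega), ht]
    simp
  | succ e ih =>
    have ha : (0:Int) < 2 ^ e := by positivity
    have hb1 : (2:Int) ^ (e+1) = 2 * 2 ^ e := by ring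
    have hb2 : (2:Int) ^ (e+2) = 4 * 2 ^ e := by ring
    have hgt : (1:Int) < t := by rw [hb1] at h1; omega
    rw [msbLoop, dif_pos hgt]
    rw [PySem.Int.floordiv_eq_ediv_of_pos (by omega : (0:Int) < 2)]
    have hdb : 2 ^ e ≤ t / 2 ∧ t / 2 < 2 ^ (e + 1) := by
      rw [hb1] at h1 ⊢
      rw [hb2] at h2
      omega
    rw [ih (t / 2) (p * 2) hdb.1 hdb.2]
    ring

theorem lsbLoop_spec (e : Nat) (q p : Int) (hq : PySem.Int.mod q 2 = 1) :
    (lsbLoop (2 ^ e * q) p).2 = p * 2 ^ e := by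
  induction e generalizing p with
  | zero =>
    rw [show (2:Int) ^ 0 * q = q by ring]
    rw [lsbLoop, dif_neg (by intro hc; rw [hc.2] at hq; exact absurd hq (by norm_num))]
    simp
  | succ e ih =>
    have hq0 : q ≠ 0 := by
      intro h0
      rw [h0] at hq
      rw [PySem.Int.mod_eq_emod_of_pos (by omega : (0:Int) < 2)] at hq
      simp at hq
    have hm0 : (2:Int) ^ (e+1) * q ≠ 0 := by positivity
    have hsplit : (2:Int) ^ (e+1) * q = 2 * (2 ^ e * q) := by ring
    have hmod : PySem.Int.mod ((2:Int) ^ (e+1) * q) 2 = 0 :=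
      (PySem.Int.mod_eq_zero_iff_dvd _ 2).mpr ⟨2 ^ e * q, hsplit⟩
    have hfd : PySem.Int.floordiv ((2:Int) ^ (e+1) * q) 2 = 2 ^ e * q := by
      rw [hsplit]; exact floordiv_mul_cancel 2 _ (by omega)
    rw [lsbLoop, dif_pos ⟨hm0, hmod⟩, hfd, ih (p * 2)]
    ring

-- ---- characterisation of B's first loop ----

theorem fold_buildStep_fst (l : List Int) (d : PySem.Dict Int Int) (b : Bool) :
    (l.foldl buildStep (d, b)).1 = buildD l d := by
  induction l generalizing d b with
  | nil => rfl
  | cons x l ih =>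
    by_cases hx : x = 0
    · simp only [List.foldl_cons, buildStep, buildD, if_pos hx]
      exact ih d true
    · simp only [List.foldl_cons, buildStep, buildD, if_neg hx]
      exact ih _ b

theorem fold_buildStep_snd (l : List Int) (d : PySem.Dict Int Int) (b : Bool) :
    (l.foldl buildStep (d, b)).2 = (b || decide (0 ∈ l)) := by
  induction l generalizing d b with
  | nil => simp
  | cons x l ih =>
    by_cases hx : x = 0
    · simp only [List.foldl_cons, buildStep, if_pos hx, ih, hx, List.mem_cons]
      simp
    · simp only [List.foldl_cons, buildStep, if_neg hx, ih, List.mem_cons]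
      have : ¬ (0 = x) := fun h => hx h.symm
      simp [this]

theorem getD_buildD (l : List Int) (d : PySem.Dict Int Int) (o : Int) :
    (buildD l d).getD o 0 = d.getD o 0 + gsum l o := by
  induction l generalizing d with
  | nil => simp [buildD, gsum]
  | cons x l ih =>
    by_cases hx : x = 0
    · have hg : gpred o x = false := by simp [gpred, hx]
      simp only [buildD, List.foldl_cons, if_pos hx, gsum, List.filter_cons, hg]
      exact ih d
    · simp only [buildD, List.foldl_cons, if_neg hx]
      rw [show (List.foldl (fun d x => if x = 0 then d
            else d.insert (oddLoop x) (d.getD (oddLoop x) 0 + x))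
            (d.insert (oddLoop x) (d.getD (oddLoop x) 0 + x)) l)
          = buildD l (d.insert (oddLoop x) (d.getD (oddLoop x) 0 + x)) from rfl]
      rw [ih]
      by_cases ho : oddLoop x = o
      · have hg : gpred o x = true := by simp [gpred, hx, ho]
        rw [PySem.Dict.getD_insert, if_pos ho.symm]
        simp only [gsum, List.filter_cons, hg, if_pos trivial, List.sum_cons]
        rw [ho]
        ring
      · have hg : gpred o x = false := by simp [gpred, hx, ho]
        rw [PySem.Dict.getD_insert, if_neg (fun h => ho h.symm)]
        simp only [gsum, List.filter_cons, hg, Bool.false_eq_true, if_false]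

theorem contains_buildD (l : List Int) (d : PySem.Dict Int Int) (o : Int) :
    (buildD l d).contains o = (d.contains o || keyIn l o) := by
  induction l generalizing d with
  | nil => simp [buildD, keyIn]
  | cons x l ih =>
    by_cases hx : x = 0
    · have hg : gpred o x = false := by simp [gpred, hx]
      simp only [buildD, List.foldl_cons, if_pos hx, keyIn, List.any_cons, hg]
      exact ih d
    · simp only [buildD, List.foldl_cons, if_neg hx]
      rw [show (List.foldl (fun d x => if x = 0 then d
            else d.insert (oddLoop x) (d.getD (oddLoop x) 0 + x))
            (d.insert (oddLoop x) (d.getD (oddLoop x) 0 + x)) l)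
          = buildD l (d.insert (oddLoop x) (d.getD (oddLoop x) 0 + x)) from rfl]
      rw [ih, PySem.Dict.contains_insert]
      by_cases ho : oddLoop x = o
      · have hg : gpred o x = true := by simp [gpred, hx, ho]
        simp [keyIn, List.any_cons, hg, ho]
      · have hg : gpred o x = false := by simp [gpred, hx, ho]
        have : (o == oddLoop x) = false := by
          simp only [beq_eq_false_iff_ne, ne_eq]
          exact fun h => ho h.symm
        simp [keyIn, List.any_cons, hg, this]

theorem nodup_keys_buildD (l : List Int) (d : PySem.Dict Int Int) (hd : d.keys.Nodup) :
    (buildD l d).keys.Nodup := by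
  induction l generalizing d with
  | nil => exact hd
  | cons x l ih =>
    by_cases hx : x = 0
    · simp only [buildD, List.foldl_cons, if_pos hx]
      exact ih d hd
    · simp only [buildD, List.foldl_cons, if_neg hx]
      exact ih _ (PySem.Dict.nodup_keys_insert _ _ _ hd)

-- ---- characterisation of B's second loop ----

theorem bestStep_some (b : Int) (p : Int × Int) :
    bestStep (some b) p = some (max b (itemVal p)) := by
  rcases le_or_gt (itemVal p) b with h | h
  · simp only [bestStep, if_neg (not_lt.mpr h), max_eq_left h]
  · simp only [bestStep, if_pos h, max_eq_right (le_of_lt h)]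

theorem bestFold_some (items : List (Int × Int)) (b : Int) :
    items.foldl bestStep (some b) = some ((items.map itemVal).foldl max b) := by
  induction items generalizing b with
  | nil => rfl
  | cons p t ih =>
    simp only [List.foldl_cons, List.map_cons, bestStep_some]
    exact ih (max b (itemVal p))

theorem bestFold_eq_max? (items : List (Int × Int)) :
    items.foldl bestStep none = PySem.List.max? (items.map itemVal) (fun y => y) := by
  cases items with
  | nil => rfl
  | cons p t =>
    simp only [List.foldl_cons, List.map_cons, PySem.List.max?_id_cons]
    rw [show bestStep none p = some (itemVal p) from rfl]
    exact bestFold_some t (itemVal p)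

theorem max?_id_perm (l1 l2 : List Int) (hp : l1.Perm l2) :
    PySem.List.max? l1 (fun y => y) = PySem.List.max? l2 (fun y => y) := by
  rcases h1 : PySem.List.max? l1 (fun y => y) with _ | m1
  · rw [PySem.List.max?_eq_none_iff] at h1
    subst h1
    rw [eq_comm, PySem.List.max?_eq_none_iff]
    exact List.length_eq_zero_iff.mp (by simpa using hp.length_eq.symm)
  rcases h2 : PySem.List.max? l2 (fun y => y) with _ | m2
  · rw [PySem.List.max?_eq_none_iff] at h2
    subst h2
    have hl1 : l1 = [] := List.length_eq_zero_iff.mp (by simpa using hp.length_eq)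
    rw [hl1, (PySem.List.max?_eq_none_iff [] (fun y => y)).mpr rfl] at h1
    cases h1
  have hm1 : m1 ∈ l2 := hp.mem_iff.mp (PySem.List.max?_mem h1)
  have hm2 : m2 ∈ l1 := hp.symm.mem_iff.mp (PySem.List.max?_mem h2)
  have le1 : m1 ≤ m2 := PySem.List.max?_isMax h2 m1 hm1
  have le2 : m2 ≤ m1 := PySem.List.max?_isMax h1 m2 hm2
  rw [le_antisymm le1 le2]

theorem alt_eq_assemble (l : List Int) :
    obtain_max_number_alt l =
      (match PySem.List.max? (((buildD l PySem.Dict.empty).keys).map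
          (fun o => itemVal (o, gsum l o))) (fun y => y) with
       | none => 0
       | some b => if 0 ∈ l ∧ b < 0 then 0 else b) := by
  have hnk : (buildD l PySem.Dict.empty).keys.Nodup := by
    apply nodup_keys_buildD
    simp [PySem.Dict.keys_empty]
  have hitems : (buildD l PySem.Dict.empty).items =
      (buildD l PySem.Dict.empty).keys.map (fun k => (k, gsum l k)) := by
    rw [PySem.Dict.items_eq_map_keys _ hnk 0]
    apply List.map_congr_left
    intro k _
    rw [getD_buildD, PySem.Dict.getD_empty, zero_add]
  have key : (buildD l PySem.Dict.empty).items.foldl bestStep none =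
      PySem.List.max? (((buildD l PySem.Dict.empty).keys).map
        (fun o => itemVal (o, gsum l o))) (fun y => y) := by
    rw [hitems, bestFold_eq_max?, List.map_map]
    rfl
  show (match ((l.foldl buildStep (PySem.Dict.empty, false)).1.items.foldl bestStep none) with
       | none => (0:Int)
       | some b => if (l.foldl buildStep (PySem.Dict.empty, false)).2 = true ∧ b < 0 then 0 else b) = _
  rw [fold_buildStep_fst, fold_buildStep_snd, key]
  rcases PySem.List.max? (((buildD l PySem.Dict.empty).keys).map
      (fun o => itemVal (o, gsum l o))) (fun y => y) with _ | b
  · rfl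
  · simp only [Bool.false_or, decide_eq_true_eq]

-- ---- B's value depends only on (0 ∈ l, keyIn, gsum) ----

theorem alt_congr (l1 l2 : List Int) (h0 : (0 ∈ l1) ↔ (0 ∈ l2))
    (hkey : ∀ o, keyIn l1 o = keyIn l2 o) (hsum : ∀ o, gsum l1 o = gsum l2 o) :
    obtain_max_number_alt l1 = obtain_max_number_alt l2 := by
  rw [alt_eq_assemble l1, alt_eq_assemble l2]
  have hf : (fun o => itemVal (o, gsum l1 o)) = (fun o => itemVal (o, gsum l2 o)) := by
    funext o; rw [hsum o]
  have hk1 : (buildD l1 PySem.Dict.empty).keys.Nodup :=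
    nodup_keys_buildD _ _ (by simp [PySem.Dict.keys_empty])
  have hk2 : (buildD l2 PySem.Dict.empty).keys.Nodup :=
    nodup_keys_buildD _ _ (by simp [PySem.Dict.keys_empty])
  have hmem : ∀ o, o ∈ (buildD l1 PySem.Dict.empty).keys ↔ o ∈ (buildD l2 PySem.Dict.empty).keys := by
    intro o
    rw [← PySem.Dict.contains_iff_mem_keys, ← PySem.Dict.contains_iff_mem_keys,
      contains_buildD, contains_buildD, hkey o]
  have hperm := (List.perm_ext_iff_of_nodup hk1 hk2).mpr hmem
  have hpm : (((buildD l1 PySem.Dict.empty).keys).map (fun o => itemVal (o, gsum l1 o))).Perm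
      (((buildD l2 PySem.Dict.empty).keys).map (fun o => itemVal (o, gsum l2 o))) := by
    rw [hf]
    exact hperm.map _
  rw [max?_id_perm _ _ hpm]
  simp only [h0]

theorem gsum_perm (l1 l2 : List Int) (o : Int) (hp : l1.Perm l2) : gsum l1 o = gsum l2 o :=
  (hp.filter (gpred o)).sum_eq

theorem keyIn_perm (l1 l2 : List Int) (o : Int) (hp : l1.Perm l2) : keyIn l1 o = keyIn l2 o := by
  simp only [keyIn]
  rw [Bool.eq_iff_iff]
  simp only [List.any_eq_true]
  exact ⟨fun ⟨x, hx, hpx⟩ => ⟨x, hp.mem_iff.mp hx, hpx⟩,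
    fun ⟨x, hx, hpx⟩ => ⟨x, hp.mem_iff.mpr hx, hpx⟩⟩

theorem gpred_double (o k : Int) (hk : k ≠ 0) : gpred o (k + k) = gpred o k := by
  simp only [gpred, oddLoop_double k hk]
  have : k + k ≠ 0 := by omega
  simp [this, hk]

-- ---- one merge step preserves B's value ----

theorem merge_preserves (c : List Int) (k : Int) (h : 2 ≤ c.count k) :
    obtain_max_number_alt (((c.erase k).erase k) ++ [k + k]) = obtain_max_number_alt c := by
  have hk1 : k ∈ c := List.count_pos_iff.mp (by omega)
  have hk2 : k ∈ c.erase k := by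
    have := @List.count_erase_self _ _ _ k c
    exact List.count_pos_iff.mp (by omega)
  have hpc : c.Perm (k :: k :: (c.erase k).erase k) :=
    (List.perm_cons_erase hk1).trans ((List.perm_cons_erase hk2).cons k)
  have hpm : (((c.erase k).erase k) ++ [k + k]).Perm ((k + k) :: (c.erase k).erase k) :=
    List.perm_append_singleton _ _
  apply alt_congr
  · rw [hpm.mem_iff, hpc.mem_iff]
    by_cases hk : k = 0
    · subst hk; simp
    · have : k + k ≠ 0 := by omega
      simp only [List.mem_cons]
      constructor
      · rintro (h1 | h1)
        · exact absurd h1.symm this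
        · exact Or.inr (Or.inr h1)
      · rintro (h1 | h1 | h1)
        · exact absurd h1.symm hk
        · exact absurd h1.symm hk
        · exact Or.inr h1
  · intro o
    rw [keyIn_perm _ _ o hpm, keyIn_perm c _ o hpc]
    simp only [keyIn, List.any_cons]
    by_cases hk : k = 0
    · subst hk
      norm_num
    · rw [gpred_double o k hk]
      cases gpred o k <;> simp
  · intro o
    rw [gsum_perm _ _ o hpm, gsum_perm c _ o hpc]
    simp only [gsum, List.filter_cons]
    by_cases hk : k = 0
    · subst hk
      have : gpred o (0 + 0) = gpred o 0 := by norm_num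
      rw [this]
      cases gpred o 0 <;> simp
    · rw [gpred_double o k hk]
      cases gpred o k <;> simp
      omega

theorem roundFold (ds : List Int) (c : List Int) (hnd : ds.Nodup)
    (hct : ∀ k ∈ ds, 2 ≤ c.count k) :
    obtain_max_number_alt (ds.foldl popTwoAppend c) = obtain_max_number_alt c ∧
      (ds ≠ [] → ds.foldl popTwoAppend c ≠ []) := by
  induction ds generalizing c with
  | nil => exact ⟨rfl, fun h => absurd rfl h⟩
  | cons k ds ih =>
    have hk : 2 ≤ c.count k := hct k List.mem_cons_self
    have hstep : popTwoAppend c k = ((c.erase k).erase k) ++ [k + k] := popTwoAppend_eq c k hk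
    have hctr : ∀ k' ∈ ds, 2 ≤ (((c.erase k).erase k) ++ [k + k]).count k' := by
      intro k' hk'
      have hne : k' ≠ k := fun h => (List.nodup_cons.mp hnd).1 (h ▸ hk')
      have e1 : (((c.erase k).erase k) ++ [k + k]).count k'
          = ((c.erase k).erase k).count k' + [k + k].count k' := List.count_append ..
      rw [List.count_erase_of_ne hne, List.count_erase_of_ne hne] at e1
      have : 0 ≤ [k + k].count k' := Nat.zero_le _
      have h2 := hct k' (List.mem_cons_of_mem k hk')
      omega
    obtain ⟨ihv, ihn⟩ := ih (((c.erase k).erase k) ++ [k + k]) (List.nodup_cons.mp hnd).2 hctr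
    constructor
    · rw [List.foldl_cons, hstep, ihv]
      exact merge_preserves c k hk
    · intro _
      rw [List.foldl_cons, hstep]
      cases hds : ds with
      | nil => simp
      | cons a t =>
        rw [← hds]
        exact ihn (by simp [hds])

theorem pyDoubles_nodup (l : List Int) : (pyDoubles l).Nodup := by
  rw [pyDoubles_eq]
  exact (PySem.Set.nodup_ofList l).filter _

theorem count_of_mem_pyDoubles (l : List Int) (k : Int) (h : k ∈ pyDoubles l) :
    2 ≤ l.count k := by
  rw [pyDoubles_eq] at h
  have := List.of_mem_filter h
  simp only [decide_eq_true_eq] at this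
  exact_mod_cast this

theorem nodup_of_pyDoubles_nil (l : List Int) (h : pyDoubles l = []) : l.Nodup := by
  rw [pyDoubles_eq] at h
  rw [List.nodup_iff_count_le_one]
  intro a
  by_cases ha : a ∈ l
  · have hmem : a ∈ PySem.Set.ofList l := (PySem.Set.mem_ofList l a).mpr ha
    have := List.filter_eq_nil_iff.mp h a hmem
    simp only [decide_eq_true_eq, not_le] at this
    omega
  · rw [List.count_eq_zero_of_not_mem ha]
    omega

theorem obtainLoop_props (l : List Int) :
    obtain_max_number_alt (obtainLoop l) = obtain_max_number_alt l ∧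
      (l ≠ [] → obtainLoop l ≠ []) ∧ (obtainLoop l).Nodup := by
  induction l using obtainLoop.induct with
  | case1 l hd =>
    have hl : obtainLoop l = l := by
      conv_lhs => rw [obtainLoop, hd]
    rw [hl]
    exact ⟨rfl, fun h => h, nodup_of_pyDoubles_nil l hd⟩
  | case2 l k ds hd ih =>
    have hl : obtainLoop l = obtainLoop ((k :: ds).foldl popTwoAppend l) := by
      conv_lhs => rw [obtainLoop, hd]
    have hnd : (k :: ds).Nodup := hd ▸ pyDoubles_nodup l
    have hct : ∀ k' ∈ (k :: ds), 2 ≤ l.count k' := fun k' hk' =>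
      count_of_mem_pyDoubles l k' (hd ▸ hk')
    obtain ⟨rv, rn⟩ := roundFold (k :: ds) l hnd hct
    obtain ⟨iv, inn, ind⟩ := ih
    refine ⟨?_, ?_, hl ▸ ind⟩
    · rw [hl, iv, rv]
    · intro _
      rw [hl]
      exact inn (rn (by simp))

-- ---- binary representation facts ----

theorem exists_max_nat (es : List Nat) (h : es ≠ []) : ∃ M ∈ es, ∀ e ∈ es, e ≤ M := by
  induction es with
  | nil => cases h rfl
  | cons a t ih =>
    cases t with
    | nil =>
      refine ⟨a, List.mem_cons_self, ?_⟩
      intro e he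
      simp only [List.mem_cons, List.not_mem_nil, or_false] at he
      omega
    | cons b u =>
      obtain ⟨M, hM, hle⟩ := ih (by simp)
      rcases le_or_gt a M with ham | ham
      · refine ⟨M, List.mem_cons_of_mem a hM, ?_⟩
        intro e he
        rcases List.mem_cons.mp he with rfl | he
        · exact ham
        · exact hle e he
      · refine ⟨a, List.mem_cons_self, ?_⟩
        intro e he
        rcases List.mem_cons.mp he with rfl | he
        · exact le_refl _
        · exact le_trans (hle e he) (le_of_lt ham)

theorem exists_min_nat (es : List Nat) (h : es ≠ []) : ∃ M ∈ es, ∀ e ∈ es, M ≤ e := by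
  induction es with
  | nil => cases h rfl
  | cons a t ih =>
    cases t with
    | nil =>
      refine ⟨a, List.mem_cons_self, ?_⟩
      intro e he
      simp only [List.mem_cons, List.not_mem_nil, or_false] at he
      omega
    | cons b u =>
      obtain ⟨M, hM, hle⟩ := ih (by simp)
      rcases le_or_gt M a with ham | ham
      · refine ⟨M, List.mem_cons_of_mem a hM, ?_⟩
        intro e he
        rcases List.mem_cons.mp he with rfl | he
        · exact ham
        · exact hle e he
      · refine ⟨a, List.mem_cons_self, ?_⟩
        intro e he
        rcases List.mem_cons.mp he with rfl | he
        · exact le_refl _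
        · exact le_trans (le_of_lt ham) (hle e he)

theorem sum_range_two_pow (n : Nat) : (∑ i ∈ Finset.range n, (2:Int) ^ i) = 2 ^ n - 1 := by
  induction n with
  | zero => simp
  | succ n ih =>
    rw [Finset.sum_range_succ, ih]
    ring

theorem sum_pows_lt (es : List Nat) (E : Nat) (hnd : es.Nodup) (hle : ∀ e ∈ es, e ≤ E) :
    (es.map (fun e => (2:Int) ^ e)).sum < 2 ^ (E + 1) := by
  rw [← List.sum_toFinset _ hnd]
  have hsub : es.toFinset ⊆ Finset.range (E + 1) := by
    intro e he
    exact Finset.mem_range.mpr (by have := hle e (List.mem_toFinset.mp he); omega)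
  have hle2 : es.toFinset.sum (fun e => (2:Int) ^ e) ≤
      ∑ i ∈ Finset.range (E + 1), (2:Int) ^ i :=
    Finset.sum_le_sum_of_subset_of_nonneg hsub (fun i _ _ => by positivity)
  rw [sum_range_two_pow] at hle2
  omega

theorem sum_pows_ge (es : List Nat) (E : Nat) (hnd : es.Nodup) (hE : E ∈ es) :
    (2:Int) ^ E ≤ (es.map (fun e => (2:Int) ^ e)).sum := by
  rw [← List.sum_toFinset _ hnd]
  exact Finset.single_le_sum (fun i _ => by positivity) (List.mem_toFinset.mpr hE)

theorem sum_pows_dvd (t : List Nat) (m : Nat) (ht : ∀ e ∈ t, m ≤ e) :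
    ∃ r : Int, (t.map (fun e => (2:Int) ^ e)).sum = 2 ^ m * r := by
  induction t with
  | nil => exact ⟨0, by simp⟩
  | cons a u ih =>
    obtain ⟨r, hr⟩ := ih (fun e he => ht e (List.mem_cons_of_mem a he))
    have ha : m ≤ a := ht a List.mem_cons_self
    refine ⟨2 ^ (a - m) + r, ?_⟩
    simp only [List.map_cons, List.sum_cons, hr]
    have : (2:Int) ^ a = 2 ^ m * 2 ^ (a - m) := by
      rw [← pow_add]
      congr 1
      omega
    rw [this]
    ring

theorem sum_pows_odd_part (es : List Nat) (M : Nat) (hnd : es.Nodup) (hM : M ∈ es)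
    (hmin : ∀ e ∈ es, M ≤ e) :
    ∃ q : Int, (es.map (fun e => (2:Int) ^ e)).sum = 2 ^ M * q ∧ PySem.Int.mod q 2 = 1 := by
  have hperm : es.Perm (M :: es.erase M) := List.perm_cons_erase hM
  have hsum : (es.map (fun e => (2:Int) ^ e)).sum
      = 2 ^ M + ((es.erase M).map (fun e => (2:Int) ^ e)).sum := by
    rw [(hperm.map _).sum_eq]
    simp
  have herase : ∀ e ∈ es.erase M, M + 1 ≤ e := by
    intro e he
    have hmem : e ∈ es := List.mem_of_mem_erase he
    have hne : e ≠ M := by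
      intro hcon
      subst hcon
      exact (List.Nodup.not_mem_erase hnd) he
    have := hmin e hmem
    omega
  obtain ⟨r, hr⟩ := sum_pows_dvd (es.erase M) (M + 1) herase
  refine ⟨1 + 2 * r, ?_, ?_⟩
  · rw [hsum, hr, pow_succ]
    ring
  · rw [PySem.Int.mod_eq_emod_of_pos (by omega : (0:Int) < 2)]
    omega

-- ---- the group lemma: per odd part, itemVal of the group sum is the group's max, a member ----

theorem group_lemma (l : List Int) (o : Int) (hnd : l.Nodup) (hk : keyIn l o = true) :
    itemVal (o, gsum l o) ∈ l ∧
      (∀ y ∈ l, gpred o y = true → y ≤ itemVal (o, gsum l o)) := by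
  -- the group and its exponents
  set G := l.filter (gpred o) with hG
  have hGprop : ∀ y ∈ G, y ≠ 0 ∧ oddLoop y = o := by
    intro y hy
    have := List.of_mem_filter hy
    simpa [gpred] using this
  have hGnd : G.Nodup := hnd.filter _
  have hGne : G ≠ [] := by
    simp only [keyIn, List.any_eq_true] at hk
    obtain ⟨x, hx, hpx⟩ := hk
    exact List.ne_nil_of_mem (List.mem_filter.mpr ⟨hx, hpx⟩)
  have hrep : ∀ y ∈ G, y = o * 2 ^ (tzAux y) := by
    intro y hy
    obtain ⟨hy0, hyo⟩ := hGprop y hy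
    obtain ⟨e1, _, _⟩ := oddLoop_spec y hy0
    rw [← hyo]
    exact e1
  have ho_ne : o ≠ 0 := by
    obtain ⟨y0, hy0⟩ := List.exists_mem_of_ne_nil G hGne
    obtain ⟨h1, h2⟩ := hGprop y0 hy0
    obtain ⟨_, _, h3⟩ := oddLoop_spec y0 h1
    exact h2 ▸ h3
  set es := G.map tzAux with hes
  have hes_ne : es ≠ [] := by simp [hes, hGne]
  have hes_nd : es.Nodup := by
    apply List.Nodup.map_on ?_ hGnd
    intro x hx y hy hxy
    have ex := hrep x hx
    have ey := hrep y hy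
    rw [ex, ey, hxy]
  -- the group sum
  set S := (es.map (fun e => (2:Int) ^ e)).sum with hS
  have hsumS : gsum l o = o * S := by
    have h1 : G.map (fun y => o * 2 ^ (tzAux y)) = G.map (fun y => y) :=
      List.map_congr_left (fun y hy => (hrep y hy).symm)
    have h2 : gsum l o = (G.map (fun y => y)).sum := by
      rw [gsum, List.map_id']
    rw [h2, ← h1, hS, hes, List.map_map]
    rw [show ((fun e => (2:Int) ^ e) ∘ tzAux) = (fun y => (2:Int) ^ (tzAux y)) from rfl]
    exact List.sum_map_mul_left G (fun y => (2:Int) ^ tzAux y) o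
  have hfd : PySem.Int.floordiv (gsum l o) o = S := by
    rw [hsumS]
    exact floordiv_mul_cancel o S ho_ne
  rcases lt_trichotomy o 0 with hneg | hzero | hpos
  · -- o < 0 : minimum exponent
    obtain ⟨M, hM, hMmin⟩ := exists_min_nat es hes_ne
    obtain ⟨q, hq, hqodd⟩ := sum_pows_odd_part es M hes_nd hM hMmin
    have hval : itemVal (o, gsum l o) = o * 2 ^ M := by
      simp only [itemVal, hfd]
      rw [if_neg (by omega), hS, hq, lsbLoop_spec M q 1 hqodd]
      ring
    obtain ⟨y, hyG, hyM⟩ := List.mem_map.mp (hes ▸ hM)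
    have hy_eq : y = o * 2 ^ M := by rw [hrep y hyG, hyM]
    constructor
    · rw [hval, ← hy_eq]
      exact List.mem_of_mem_filter hyG
    · intro z hz hpz
      have hzG : z ∈ G := List.mem_filter.mpr ⟨hz, hpz⟩
      have hz_eq : z = o * 2 ^ (tzAux z) := hrep z hzG
      have htz : M ≤ tzAux z := hMmin _ (List.mem_map.mpr ⟨z, hzG, rfl⟩)
      rw [hval, hz_eq]
      have hpow : (2:Int) ^ M ≤ 2 ^ (tzAux z) := pow_le_pow_right₀ (by norm_num) htz
      exact mul_le_mul_of_nonpos_left hpow (le_of_lt hneg)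
  · exact absurd hzero ho_ne
  · -- o > 0 : maximum exponent
    obtain ⟨E, hE, hEmax⟩ := exists_max_nat es hes_ne
    have hge : (2:Int) ^ E ≤ S := by rw [hS]; exact sum_pows_ge es E hes_nd hE
    have hlt : S < 2 ^ (E + 1) := by rw [hS]; exact sum_pows_lt es E hes_nd hEmax
    have hval : itemVal (o, gsum l o) = o * 2 ^ E := by
      simp only [itemVal, hfd]
      rw [if_pos hpos, msbLoop_spec E S 1 hge hlt]
      ring
    obtain ⟨y, hyG, hyE⟩ := List.mem_map.mp (hes ▸ hE)
    have hy_eq : y = o * 2 ^ E := by rw [hrep y hyG, hyE]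
    constructor
    · rw [hval, ← hy_eq]
      exact List.mem_of_mem_filter hyG
    · intro z hz hpz
      have hzG : z ∈ G := List.mem_filter.mpr ⟨hz, hpz⟩
      have hz_eq : z = o * 2 ^ (tzAux z) := hrep z hzG
      have htz : tzAux z ≤ E := hEmax _ (List.mem_map.mpr ⟨z, hzG, rfl⟩)
      rw [hval, hz_eq]
      have hpow : (2:Int) ^ (tzAux z) ≤ 2 ^ E := pow_le_pow_right₀ (by norm_num) htz
      exact mul_le_mul_of_nonneg_left hpow (le_of_lt hpos)

-- ---- terminal state: on a duplicate-free nonempty list, max(l) = B(l) ----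

theorem terminal_lemma (l : List Int) (hne : l ≠ []) (hnd : l.Nodup) :
    PySem.List.max? l (fun x => x) = some (obtain_max_number_alt l) := by
  rcases hM : PySem.List.max? l (fun x => x) with _ | M
  · rw [PySem.List.max?_eq_none_iff] at hM
    exact absurd hM hne
  have hMm : M ∈ l := PySem.List.max?_mem hM
  have hMmax : ∀ y ∈ l, y ≤ M := PySem.List.max?_isMax hM
  suffices h : obtain_max_number_alt l = M by rw [h]
  rw [alt_eq_assemble l]
  have hkeys : ∀ o, o ∈ (buildD l PySem.Dict.empty).keys ↔ keyIn l o = true := by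
    intro o
    rw [← PySem.Dict.contains_iff_mem_keys, contains_buildD, PySem.Dict.contains_empty]
    simp
  rcases hb : PySem.List.max? (((buildD l PySem.Dict.empty).keys).map
      (fun o => itemVal (o, gsum l o))) (fun y => y) with _ | v
  · -- no keys: every element of l is 0
    rw [PySem.List.max?_eq_none_iff] at hb
    have hkeys_nil : (buildD l PySem.Dict.empty).keys = [] := List.map_eq_nil_iff.mp hb
    have hM0 : M = 0 := by
      by_contra hy0
      have hkIn : keyIn l (oddLoop M) = true := by
        simp only [keyIn, List.any_eq_true]
        exact ⟨M, hMm, by simp [gpred, hy0]⟩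
      have := (hkeys (oddLoop M)).mpr hkIn
      rw [hkeys_nil] at this
      cases this
    show (0:Int) = M
    omega
  · show (if 0 ∈ l ∧ v < 0 then (0:Int) else v) = M
    have hvmem : v ∈ l := by
      obtain ⟨o, ho, hov⟩ := List.mem_map.mp (PySem.List.max?_mem hb)
      exact hov ▸ (group_lemma l o hnd ((hkeys o).mp ho)).1
    have hup : ∀ y ∈ l, y ≠ 0 → y ≤ v := by
      intro y hy hy0
      have hkIn : keyIn l (oddLoop y) = true := by
        simp only [keyIn, List.any_eq_true]
        exact ⟨y, hy, by simp [gpred, hy0]⟩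
      have hoin : oddLoop y ∈ (buildD l PySem.Dict.empty).keys := (hkeys _).mpr hkIn
      have hvin : itemVal (oddLoop y, gsum l (oddLoop y)) ∈
          ((buildD l PySem.Dict.empty).keys).map (fun o => itemVal (o, gsum l o)) :=
        List.mem_map.mpr ⟨_, hoin, rfl⟩
      have h1 : y ≤ itemVal (oddLoop y, gsum l (oddLoop y)) :=
        (group_lemma l (oddLoop y) hnd hkIn).2 y hy (by simp [gpred, hy0])
      have h2 := PySem.List.max?_isMax hb _ hvin
      simp only at h2
      omega
    by_cases hc : 0 ∈ l ∧ v < 0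
    · rw [if_pos hc]
      have h0M : (0:Int) ≤ M := hMmax 0 hc.1
      have hMv : M ≤ 0 := by
        by_cases hM0' : M = 0
        · omega
        · have := hup M hMm hM0'
          have := hc.2
          omega
      omega
    · rw [if_neg hc]
      have h1 : v ≤ M := hMmax v hvmem
      have h2 : M ≤ v := by
        by_cases hM0' : M = 0
        · have hv0 : ¬ v < 0 := fun hv => hc ⟨hM0' ▸ hMm, hv⟩
          omega
        · exact hup M hMm hM0'
      omega

theorem obtain_max_number_main : ∀ (lst : List Int), lst ≠ [] →
    obtain_max_number lst = obtain_max_number_alt lst := by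
  intro lst hne
  obtain ⟨hval, hne2, hnd⟩ := obtainLoop_props lst
  rw [obtain_max_number, terminal_lemma (obtainLoop lst) (hne2 hne) hnd, hval]

-- ===== VERDICT (by name: the statement is the Claim_ definition above) =====
theorem obtain_max_number_spec : Claim_equal_obtain_max_number := by
  intro lst _ hpre
  exact obtain_max_number_main lst hpre
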